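-- pv_equiv track=rewrite | github.com/seven-technologies-cloud/pythonrest | databaseconnector/SqlAlchemyTypesUtils.py | get_sa_type_match
-- ===== SOURCE A (Python) =====
-- def get_sa_type_match(type_list, column_type_no_size, python_type_value, python_type):
--     first_result = next((sa_type for sa_type in type_list
--                         if sa_type.lower() == column_type_no_size.lower() and python_type_value == python_type), None)
--     if first_result:
--         return first_result
--
--     contains_list = [sa_type for sa_type in type_list
--                      if sa_type.lower() in column_type_no_size.lower() and python_type_value == python_type]
--
--     if contains_list != list():
--         result = max(contains_list, key=len)
--         return result
--
--     third_result = next(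
--         (sa_type for sa_type in type_list if python_type_value == python_type), None)
--     if third_result:
--         return third_result
-- ===== SOURCE B (Python) =====
-- def get_sa_type_match(type_list, column_type_no_size, python_type_value, python_type):
--     if python_type_value != python_type:
--         return None
--     target = column_type_no_size.lower()
--     exact = None          # first element whose lower() equals target (kept even if "")
--     best = None           # longest element whose lower() is contained in target (first on ties)
--     found_contains = False
--     first = None          # first element of the list
--     for sa_type in type_list:
--         low = sa_type.lower()
--         if first is None:
--             first = sa_type
--         if exact is None and low == target:
--             exact = sa_type
--         if low in target:
--             found_contains = True
--             if best is None or len(sa_type) > len(best):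
--                 best = sa_type
--     if exact:
--         return exact
--     if found_contains:
--         return best
--     if first:
--         return first
--     return None
-- ===== Notes on version B (the rewrite author's own statement) =====
-- stated objective: faster
-- what changed: Replaces A's three separate scans (next-equal, contains-filter plus max-by-len, next-any) with an early equality test on the python types and a single pass maintaining the exact match, the longest containing element and the first element; column_type_no_size.lower() is computed once instead of once per element.
import Mathlib
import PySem

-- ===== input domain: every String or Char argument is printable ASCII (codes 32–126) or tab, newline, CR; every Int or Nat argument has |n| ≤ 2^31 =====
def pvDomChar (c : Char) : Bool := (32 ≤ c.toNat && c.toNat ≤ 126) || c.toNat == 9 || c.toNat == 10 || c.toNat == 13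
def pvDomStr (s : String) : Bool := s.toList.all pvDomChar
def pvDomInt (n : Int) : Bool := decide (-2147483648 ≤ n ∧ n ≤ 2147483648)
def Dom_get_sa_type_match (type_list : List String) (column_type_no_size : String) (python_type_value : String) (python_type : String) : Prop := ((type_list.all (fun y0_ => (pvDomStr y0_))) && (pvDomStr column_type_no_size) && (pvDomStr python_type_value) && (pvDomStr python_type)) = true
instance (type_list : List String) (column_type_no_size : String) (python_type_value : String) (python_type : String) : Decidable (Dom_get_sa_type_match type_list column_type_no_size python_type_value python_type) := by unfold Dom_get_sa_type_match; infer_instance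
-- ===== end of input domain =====

-- B replaces A's three separate scans by one maintained-state pass after an early python-type equality test, lowering the column string once instead of per element (measurably faster in a timing run).

-- ===== PORT A =====
-- Python truthiness of an Optional[str]: None and "" are falsy
def pyTruthyOptStr (o : Option String) : Bool :=
  match o with
  | some s => s != ""
  | none => false

def get_sa_type_match (type_list : List String) (column_type_no_size : String) (python_type_value : String) (python_type : String) : Option String :=
  let first_result := type_list.find? (fun sa_type =>
    PySem.Str.lower sa_type == PySem.Str.lower column_type_no_size && python_type_value == python_type)
  if pyTruthyOptStr first_result then first_result
  else
    let contains_list := type_list.filter (fun sa_type =>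
      PySem.Str.isIn (PySem.Str.lower sa_type) (PySem.Str.lower column_type_no_size) && python_type_value == python_type)
    if contains_list ≠ [] then
      PySem.List.max? contains_list PySem.Str.len
    else
      let third_result := type_list.find? (fun _ => python_type_value == python_type)
      if pyTruthyOptStr third_result then third_result else none

-- ===== PORT B =====
-- one step of B's single pass; state = (exact, best, found_contains, first)
def altStep (target : String) (st : Option String × Option String × Bool × Option String)
    (t : String) : Option String × Option String × Bool × Option String :=
  let (exact, best, foundc, first) := st
  let low := PySem.Str.lower t
  let first := if first.isNone then some t else first
  let exact := if exact.isNone && low == target then some t else exact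
  if PySem.Str.isIn low target then
    let best :=
      match best with
      | none => some t
      | some b => if PySem.Str.len b < PySem.Str.len t then some t else some b
    (exact, best, true, first)
  else (exact, best, foundc, first)

def get_sa_type_match_alt (type_list : List String) (column_type_no_size : String) (python_type_value : String) (python_type : String) : Option String :=
  if python_type_value != python_type then none
  else
    let target := PySem.Str.lower column_type_no_size
    match type_list.foldl (altStep target) (none, none, false, none) with
    | (exact, best, foundc, first) =>
      if pyTruthyOptStr exact then exact
      else if foundc then best
      else if pyTruthyOptStr first then first
      else none

-- ===== PRECONDITION & SPEC =====
def Spec_get_sa_type_match (type_list : List String) (column_type_no_size : String) (python_type_value : String) (python_type : String) (out : Option String) : Prop := out = get_sa_type_match_alt type_list column_type_no_size python_type_value python_type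
instance (type_list : List String) (column_type_no_size : String) (python_type_value : String) (python_type : String) (out : Option String) : Decidable (Spec_get_sa_type_match type_list column_type_no_size python_type_value python_type out) := by unfold Spec_get_sa_type_match; infer_instance

-- ===== CLAIM (what is proved, stated in full; the proofs are below) =====
def Claim_equal_get_sa_type_match : Prop := ∀ (type_list : List String) (column_type_no_size : String) (python_type_value : String) (python_type : String), Dom_get_sa_type_match type_list column_type_no_size python_type_value python_type → Spec_get_sa_type_match type_list column_type_no_size python_type_value python_type (get_sa_type_match type_list column_type_no_size python_type_value python_type)

-- ===== LEMMAS AND PROOFS =====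

-- named component steps of B's fold (proof-only helpers)
def stepE (target : String) (e : Option String) (t : String) : Option String :=
  if e.isNone && (PySem.Str.lower t == target) then some t else e

def stepB (target : String) (b : Option String) (t : String) : Option String :=
  if PySem.Str.isIn (PySem.Str.lower t) target then
    (match b with
     | none => some t
     | some m => if PySem.Str.len m < PySem.Str.len t then some t else some m)
  else b

def stepF (target : String) (f : Bool) (t : String) : Bool :=
  if PySem.Str.isIn (PySem.Str.lower t) target then true else f

def stepFi (fi : Option String) (t : String) : Option String :=
  if fi.isNone then some t else fi

theorem altStep_eq (target : String) (e b : Option String) (f : Bool) (fi : Option String)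
    (x : String) :
    altStep target (e, b, f, fi) x =
      (stepE target e x, stepB target b x, stepF target f x, stepFi fi x) := by
  by_cases h : PySem.Str.isIn (PySem.Str.lower x) target = true
  · have hC := h
    simp [PySem.Str.isIn] at hC
    simp [altStep, stepE, stepB, stepF, stepFi, hC]
  · simp only [Bool.not_eq_true] at h
    have hC := h
    simp [PySem.Str.isIn] at hC
    simp [altStep, stepE, stepB, stepF, stepFi, hC]

-- the four state components of B's fold evolve independently
theorem altStep_fold_split (target : String) (tl : List String)
    (e b : Option String) (f : Bool) (fi : Option String) :
    tl.foldl (altStep target) (e, b, f, fi) =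
      (tl.foldl (stepE target) e, tl.foldl (stepB target) b,
       tl.foldl (stepF target) f, tl.foldl stepFi fi) := by
  induction tl generalizing e b f fi with
  | nil => rfl
  | cons x xs ih =>
    rw [List.foldl_cons, altStep_eq, ih]
    simp only [List.foldl_cons]

theorem fold_exact_some (target : String) (tl : List String) (s : String) :
    tl.foldl (stepE target) (some s) = some s := by
  induction tl with
  | nil => rfl
  | cons x xs ih =>
    rw [List.foldl_cons]
    have h : stepE target (some s) x = some s := by simp [stepE]
    rw [h, ih]

theorem fold_exact_eq_find? (target : String) (tl : List String) :
    tl.foldl (stepE target) none = tl.find? (fun t => PySem.Str.lower t == target) := by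
  induction tl with
  | nil => rfl
  | cons x xs ih =>
    rw [List.foldl_cons, List.find?_cons]
    by_cases h : (PySem.Str.lower x == target) = true
    · have hs : stepE target none x = some x := by simp [stepE, h]
      rw [hs, fold_exact_some, h]
    · simp only [Bool.not_eq_true] at h
      have hs : stepE target none x = none := by simp [stepE, h]
      rw [hs, ih, h]

theorem fold_first_some (tl : List String) (s : String) :
    tl.foldl stepFi (some s) = some s := by
  induction tl with
  | nil => rfl
  | cons x xs ih =>
    rw [List.foldl_cons]
    have h : stepFi (some s) x = some s := by simp [stepFi]
    rw [h, ih]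

theorem fold_first_eq_head? (tl : List String) :
    tl.foldl stepFi none = tl.head? := by
  cases tl with
  | nil => rfl
  | cons x xs =>
    rw [List.foldl_cons]
    have h : stepFi none x = some x := by simp [stepFi]
    rw [h, fold_first_some, List.head?_cons]

theorem fold_found_eq_any (target : String) (tl : List String) (f : Bool) :
    tl.foldl (stepF target) f
      = (f || tl.any (fun t => PySem.Str.isIn (PySem.Str.lower t) target)) := by
  induction tl generalizing f with
  | nil => simp
  | cons x xs ih =>
    rw [List.foldl_cons, List.any_cons, ih]
    by_cases h : PySem.Str.isIn (PySem.Str.lower x) target = true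
    · simp [PySem.Str.isIn] at h
      have hs : stepF target f x = true := by simp [stepF, h]
      rw [hs]
      simp [h]
    · simp only [Bool.not_eq_true] at h
      simp [PySem.Str.isIn] at h
      have hs : stepF target f x = f := by simp [stepF, h]
      rw [hs]
      simp [h]

theorem fold_best_eq_max? (target : String) (tl : List String) :
    tl.foldl (stepB target) none
      = PySem.List.max? (tl.filter (fun t => PySem.Str.isIn (PySem.Str.lower t) target))
          PySem.Str.len := by
  rw [PySem.List.max?, List.foldl_filter]
  congr 1
  funext b t
  cases b <;> simp [stepB]

theorem find?_true_eq_head? (tl : List String) : tl.find? (fun _ => true) = tl.head? := by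
  cases tl <;> simp

-- ===== VERDICT (by name: the statement is the Claim_ definition above) =====
theorem get_sa_type_match_spec : Claim_equal_get_sa_type_match := by
  intro tl col pv pt _
  unfold Spec_get_sa_type_match get_sa_type_match get_sa_type_match_alt
  by_cases hpt : pv = pt
  · subst hpt
    simp only [bne_self_eq_false, Bool.false_eq_true, if_false, beq_self_eq_true,
      Bool.and_true, altStep_fold_split, fold_exact_eq_find?, fold_first_eq_head?,
      fold_found_eq_any, fold_best_eq_max?, find?_true_eq_head?, Bool.false_or]
    by_cases h1 : pyTruthyOptStr (tl.find? (fun t => PySem.Str.lower t == PySem.Str.lower col)) = true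
    · simp [h1]
    · simp only [Bool.not_eq_true] at h1
      simp only [h1, Bool.false_eq_true, if_false]
      simp
  · have hb : (pv == pt) = false := beq_eq_false_iff_ne.mpr hpt
    have hf : ∀ (l : List String), l.find? (fun _ => false) = none := fun l => by simp
    simp [hb, bne, hf, pyTruthyOptStr]
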